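-- pv_equiv track=rewrite | github.com/pronoun66/A-Fun-Problem | groupProducts.py | groupProducts
-- ===== SOURCE A (Python) =====
-- def groupProducts(products):
--     brandType = {}
--     for p in products:
--         if p['brand'] not in brandType.keys():
--             brandType[p['brand']] = {}
--         brandType[p['brand']][p['type']] = 1
--     groupedProducts = []
--     for b in sorted(brandType.keys()):
--         for t in sorted(brandType[b].keys()):
--            groupedProducts.append({
--                'brand': b,
--                'type': t
--            })
--     return groupedProducts
-- ===== SOURCE B (Python) =====
-- def groupProducts(products):
--     pairs = sorted((p['brand'], p['type']) for p in products)
--     groupedProducts = []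
--     prev = None
--     for bt in pairs:
--         if prev != bt:
--             groupedProducts.append({'brand': bt[0], 'type': bt[1]})
--             prev = bt
--     return groupedProducts
-- ===== Notes on version B (the rewrite author's own statement) =====
-- stated objective: alternative
-- what changed: Instead of deduplicating into a nested dict and then walking it with two nested sorted-key loops, B sorts the raw (brand, type) pair list with duplicates still present and removes duplicates in a single linear scan that compares each pair with the previous one.
import Mathlib
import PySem

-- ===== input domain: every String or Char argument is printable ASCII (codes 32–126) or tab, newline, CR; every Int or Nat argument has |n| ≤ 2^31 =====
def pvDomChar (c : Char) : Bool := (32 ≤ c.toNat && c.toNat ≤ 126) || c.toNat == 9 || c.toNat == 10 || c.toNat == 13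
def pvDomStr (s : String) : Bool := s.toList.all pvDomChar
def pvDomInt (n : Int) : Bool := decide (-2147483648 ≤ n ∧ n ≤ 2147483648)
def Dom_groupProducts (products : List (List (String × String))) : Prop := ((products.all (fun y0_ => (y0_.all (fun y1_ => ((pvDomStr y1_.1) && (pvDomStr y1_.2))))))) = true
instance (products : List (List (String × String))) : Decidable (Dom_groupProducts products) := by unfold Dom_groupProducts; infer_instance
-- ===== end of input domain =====

-- B drops the nested dict entirely: it sorts the raw (brand, type) pair list (duplicates and
-- all) and removes duplicates in one linear scan against the previous pair (objective: alternative).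

-- ===== PORT A =====
-- p['brand'] / p['type']: first-match lookup in the association list; under Pre_ the key is
-- present, so the total getD with default "" computes exactly Python's p[k].
def pvRowGet (p : List (String × String)) (k : String) : String :=
  (PySem.Dict.mk p).getD k ""

def groupProducts (products : List (List (String × String))) : List (List (String × String)) :=
  let brandType : PySem.Dict String (PySem.Dict String Int) :=
    products.foldl (fun d p =>
      let d' := if pvRowGet p "brand" ∈ d.keys then d else d.insert (pvRowGet p "brand") PySem.Dict.empty
      d'.insert (pvRowGet p "brand")
        ((d'.getD (pvRowGet p "brand") PySem.Dict.empty).insert (pvRowGet p "type") (1 : Int)))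
      PySem.Dict.empty
  (PySem.List.sorted brandType.keys (fun k => k)).foldl (fun acc b =>
    (PySem.List.sorted (brandType.getD b PySem.Dict.empty).keys (fun k => k)).foldl (fun acc t =>
      acc ++ [[("brand", b), ("type", t)]]) acc) []

-- ===== PORT B =====
def groupProducts_alt (products : List (List (String × String))) : List (List (String × String)) :=
  let pairs := PySem.List.sorted2 (products.map (fun p => (pvRowGet p "brand", pvRowGet p "type")))
    (fun x => x.1) (fun x => x.2)
  (pairs.foldl (fun st bt =>
      if st.2 ≠ some bt then (st.1 ++ [[("brand", bt.1), ("type", bt.2)]], some bt) else st)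
    (([] : List (List (String × String))), (none : Option (String × String)))).1

-- ===== PRECONDITION & SPEC =====
-- Pre_ excludes exactly the inputs where Python's p['brand'] / p['type'] raises KeyError
-- (a product dict missing either key); both A and B raise there.
def Pre_groupProducts (products : List (List (String × String))) : Prop :=
  (products.all (fun p => p.any (fun q => q.1 == "brand") && p.any (fun q => q.1 == "type"))) = true
instance (products : List (List (String × String))) : Decidable (Pre_groupProducts products) := by unfold Pre_groupProducts; infer_instance
def pvWitness_groupProducts : (List (List (String × String))) :=
  [[("brand", "b1"), ("type", "t2")], [("brand", "b1"), ("type", "t1")]]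
def Spec_groupProducts (products : List (List (String × String))) (out : List (List (String × String))) : Prop := out = groupProducts_alt products
instance (products : List (List (String × String))) (out : List (List (String × String))) : Decidable (Spec_groupProducts products out) := by unfold Spec_groupProducts; infer_instance

-- ===== CLAIM (what is proved, stated in full; the proofs are below) =====
def Claim_equal_groupProducts : Prop := ∀ (products : List (List (String × String))), Dom_groupProducts products → Pre_groupProducts products → Spec_groupProducts products (groupProducts products)

-- ===== LEMMAS AND PROOFS =====

-- the (brand, type) pair a product row contributes
def pvBT (p : List (String × String)) : String × String := (pvRowGet p "brand", pvRowGet p "type")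

-- Python's lexicographic order on string pairs
def pvLexLt (a b : String × String) : Prop := a.1 < b.1 ∨ (a.1 = b.1 ∧ a.2 < b.2)

theorem pvLexLt_trans {a b c : String × String} (h1 : pvLexLt a b) (h2 : pvLexLt b c) : pvLexLt a c := by
  rcases h1 with h1 | ⟨e1, h1⟩ <;> rcases h2 with h2 | ⟨e2, h2⟩
  · exact Or.inl (lt_trans h1 h2)
  · exact Or.inl (e2 ▸ h1)
  · exact Or.inl (e1 ▸ h2)
  · exact Or.inr ⟨e1.trans e2, lt_trans h1 h2⟩

theorem pvLexLt_asymm {a b : String × String} (h1 : pvLexLt a b) (h2 : pvLexLt b a) : False := by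
  rcases h1 with h1 | ⟨e1, h1⟩ <;> rcases h2 with h2 | ⟨e2, h2⟩
  · exact absurd h2 (not_lt_of_gt h1)
  · exact absurd h1 (e2 ▸ lt_irrefl _)
  · exact absurd h2 (e1 ▸ lt_irrefl _)
  · exact absurd h2 (not_lt_of_gt h1)

theorem pvLexLt_total {a b : String × String} (hne : a ≠ b) : pvLexLt a b ∨ pvLexLt b a := by
  rcases lt_trichotomy a.1 b.1 with h | h | h
  · exact Or.inl (Or.inl h)
  · rcases lt_trichotomy a.2 b.2 with h2 | h2 | h2
    · exact Or.inl (Or.inr ⟨h, h2⟩)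
    · exact absurd (Prod.ext h h2) hne
    · exact Or.inr (Or.inr ⟨h.symm, h2⟩)
  · exact Or.inr (Or.inl h)

theorem pvLexLt_ne {a b : String × String} (h : pvLexLt a b) : a ≠ b := by
  rintro rfl; exact pvLexLt_asymm h h

-- the boolean comparison sorted2 uses is exactly pvLexLt
def pvBefore (a b : String × String) : Bool :=
  decide (a.1 < b.1) || (!decide (b.1 < a.1) && decide (a.2 < b.2))

theorem pvBefore_iff (a b : String × String) : pvBefore a b = true ↔ pvLexLt a b := by
  simp only [pvBefore, pvLexLt, Bool.or_eq_true, Bool.and_eq_true, Bool.not_eq_true',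
    decide_eq_true_iff, decide_eq_false_iff_not]
  constructor
  · rintro (h | ⟨h1, h2⟩)
    · exact Or.inl h
    · rcases eq_or_lt_of_le (le_of_not_gt h1) with e | l
      · exact Or.inr ⟨e, h2⟩
      · exact Or.inl l
  · rintro (h | ⟨e, h⟩)
    · exact Or.inl h
    · exact Or.inr ⟨by rw [e]; exact lt_irrefl _, h⟩

-- insertBy with pvBefore preserves the "no later element is lex-smaller" invariant
theorem pvPairwise_insertBy (x : String × String) (l : List (String × String))
    (h : l.Pairwise (fun a b => ¬ pvLexLt b a)) :
    (PySem.List.insertBy pvBefore x l).Pairwise (fun a b => ¬ pvLexLt b a) := by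
  induction l with
  | nil => simp [PySem.List.insertBy]
  | cons y ys ih =>
    rw [List.pairwise_cons] at h
    by_cases hb : pvBefore x y = true
    · have hxy : pvLexLt x y := (pvBefore_iff x y).mp hb
      rw [show PySem.List.insertBy pvBefore x (y :: ys) = x :: y :: ys by
        simp [PySem.List.insertBy, hb]]
      refine List.Pairwise.cons ?_ (List.Pairwise.cons h.1 h.2)
      intro z hz hzx
      rcases List.mem_cons.mp hz with rfl | hz
      · exact pvLexLt_asymm hxy hzx
      · exact h.1 z hz (pvLexLt_trans hzx hxy)
    · rw [show PySem.List.insertBy pvBefore x (y :: ys) = y :: PySem.List.insertBy pvBefore x ys by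
        simp [PySem.List.insertBy, hb]]
      refine List.Pairwise.cons ?_ (ih h.2)
      intro z hz hzy
      have hz' : z = x ∨ z ∈ ys := (PySem.List.mem_insertBy pvBefore x z ys).mp hz
      rcases hz' with rfl | hz'
      · exact hb ((pvBefore_iff _ y).mpr hzy)
      · exact h.1 z hz' hzy

theorem pvPairwise_foldl_insertBy (l acc : List (String × String))
    (h : acc.Pairwise (fun a b => ¬ pvLexLt b a)) :
    (l.foldl (fun acc x => PySem.List.insertBy pvBefore x acc) acc).Pairwise
      (fun a b => ¬ pvLexLt b a) := by
  induction l generalizing acc with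
  | nil => exact h
  | cons x xs ih => exact ih _ (pvPairwise_insertBy x acc h)

theorem pvSorted2_pairwise (s : List (String × String)) :
    (PySem.List.sorted2 s (fun x => x.1) (fun x => x.2)).Pairwise (fun a b => ¬ pvLexLt b a) := by
  have : PySem.List.sorted2 s (fun x => x.1) (fun x => x.2) =
      s.foldl (fun acc x => PySem.List.insertBy pvBefore x acc) [] := rfl
  rw [this]
  exact pvPairwise_foldl_insertBy s [] List.Pairwise.nil

-- the A-side fold step, on pairs
def pvStep (d : PySem.Dict String (PySem.Dict String Int)) (x : String × String) :
    PySem.Dict String (PySem.Dict String Int) :=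
  let d' := if x.1 ∈ d.keys then d else d.insert x.1 PySem.Dict.empty
  d'.insert x.1 ((d'.getD x.1 PySem.Dict.empty).insert x.2 (1 : Int))

theorem pvStep_getD (d : PySem.Dict String (PySem.Dict String Int)) (x : String × String) (b : String) :
    (pvStep d x).getD b PySem.Dict.empty =
      if b = x.1 then (d.getD x.1 PySem.Dict.empty).insert x.2 1
      else d.getD b PySem.Dict.empty := by
  unfold pvStep
  by_cases hc : x.1 ∈ d.keys
  · simp only [hc, if_true, PySem.Dict.getD_insert]
  · have hcf : d.contains x.1 = false := by
      rw [← Bool.not_eq_true, PySem.Dict.contains_iff_mem_keys]; exact hc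
    simp only [hc, if_false, PySem.Dict.getD_insert,
      PySem.Dict.getD_of_not_contains d PySem.Dict.empty hcf]
    split_ifs <;> simp

theorem pvStep_mem_keys (d : PySem.Dict String (PySem.Dict String Int)) (x : String × String) (b : String) :
    b ∈ (pvStep d x).keys ↔ b = x.1 ∨ b ∈ d.keys := by
  unfold pvStep
  by_cases hc : x.1 ∈ d.keys <;>
    simp [hc, PySem.Dict.mem_keys_insert]

theorem pvStep_nodup (d : PySem.Dict String (PySem.Dict String Int)) (x : String × String)
    (h : d.keys.Nodup) : (pvStep d x).keys.Nodup := by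
  unfold pvStep
  by_cases hc : x.1 ∈ d.keys <;>
    simp only [hc, if_true, if_false] <;>
    exact PySem.Dict.nodup_keys_insert _ _ _ (by first | exact h | exact PySem.Dict.nodup_keys_insert _ _ _ h)

def pvFold (L : List (String × String)) : PySem.Dict String (PySem.Dict String Int) :=
  L.foldl pvStep PySem.Dict.empty

theorem pvFold_mem_keys_aux (L : List (String × String)) (d : PySem.Dict String (PySem.Dict String Int)) (b : String) :
    b ∈ (L.foldl pvStep d).keys ↔ b ∈ d.keys ∨ (∃ t, (b, t) ∈ L) := by
  induction L generalizing d with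
  | nil => simp
  | cons x xs ih =>
    simp only [List.foldl_cons, ih, pvStep_mem_keys, List.mem_cons]
    constructor
    · rintro ((rfl | hd) | ⟨t, ht⟩)
      · exact Or.inr ⟨x.2, Or.inl rfl⟩
      · exact Or.inl hd
      · exact Or.inr ⟨t, Or.inr ht⟩
    · rintro (hd | ⟨t, rfl | ht⟩)
      · exact Or.inl (Or.inr hd)
      · exact Or.inl (Or.inl rfl)
      · exact Or.inr ⟨t, ht⟩

theorem pvFold_inner_aux (L : List (String × String)) (d : PySem.Dict String (PySem.Dict String Int)) (b t : String) :
    t ∈ ((L.foldl pvStep d).getD b PySem.Dict.empty).keys ↔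
      t ∈ (d.getD b PySem.Dict.empty).keys ∨ (b, t) ∈ L := by
  induction L generalizing d with
  | nil => simp
  | cons x xs ih =>
    simp only [List.foldl_cons, ih, pvStep_getD, List.mem_cons]
    by_cases hb : b = x.1
    · subst hb
      simp only [if_true, PySem.Dict.mem_keys_insert]
      constructor
      · rintro ((rfl | hd) | hx)
        · exact Or.inr (Or.inl (by rw [Prod.ext_iff]; exact ⟨rfl, rfl⟩))
        · exact Or.inl hd
        · exact Or.inr (Or.inr hx)
      · rintro (hd | (he | hx))
        · exact Or.inl (Or.inr hd)
        · exact Or.inl (Or.inl (congrArg Prod.snd he))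
        · exact Or.inr hx
    · simp only [if_neg hb]
      constructor
      · rintro (hd | hx)
        · exact Or.inl hd
        · exact Or.inr (Or.inr hx)
      · rintro (hd | (he | hx))
        · exact Or.inl hd
        · exact absurd (congrArg Prod.fst he) hb
        · exact Or.inr hx

theorem pvFold_nodup (L : List (String × String)) :
    (pvFold L).keys.Nodup := by
  unfold pvFold
  have : ∀ (d : PySem.Dict String (PySem.Dict String Int)), d.keys.Nodup → (L.foldl pvStep d).keys.Nodup := by
    induction L with
    | nil => intro d h; exact h
    | cons x xs ih => intro d h; exact ih _ (pvStep_nodup d x h)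
  exact this _ PySem.Dict.nodup_keys_empty

theorem pvFold_inner_nodup (L : List (String × String)) (b : String) :
    ((pvFold L).getD b PySem.Dict.empty).keys.Nodup := by
  unfold pvFold
  have : ∀ (d : PySem.Dict String (PySem.Dict String Int)),
      (∀ b', (d.getD b' PySem.Dict.empty).keys.Nodup) →
      ((L.foldl pvStep d).getD b PySem.Dict.empty).keys.Nodup := by
    induction L with
    | nil => intro d h; exact h b
    | cons x xs ih =>
      intro d h
      refine ih _ ?_
      intro b'
      rw [pvStep_getD]
      split_ifs with hb
      · exact PySem.Dict.nodup_keys_insert _ _ _ (h x.1)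
      · exact h b'
  refine this _ ?_
  intro b'
  simp [PySem.Dict.getD_empty]

-- strictified pairwise of sorted keys
theorem pvSorted_keys_strict (K : List String) (hnd : K.Nodup) :
    (PySem.List.sorted K (fun k => k)).Pairwise (fun a b => a < b) := by
  have hle := PySem.List.sorted_pairwise K (fun k => k)
  have hnd' : (PySem.List.sorted K (fun k => k)).Nodup :=
    (PySem.List.sorted_perm K (fun k => k) false).nodup_iff.mpr hnd
  refine (hle.and hnd').imp ?_
  rintro a b ⟨h1, h2⟩
  exact lt_of_le_of_ne h1 h2

-- ===== B-side lemmas: the adjacent-dedup scan =====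

-- recursive model of B's prev-comparing scan (proof helper; the port itself is the foldl)
def pvDedup : Option (String × String) → List (String × String) → List (String × String)
  | _, [] => []
  | prev, x :: xs => if prev ≠ some x then x :: pvDedup (some x) xs else pvDedup prev xs

theorem pvFoldl_dedup (l : List (String × String)) (acc : List (List (String × String)))
    (prev : Option (String × String)) :
    (l.foldl (fun st bt =>
        if st.2 ≠ some bt then (st.1 ++ [[("brand", bt.1), ("type", bt.2)]], some bt) else st)
      (acc, prev)).1
    = acc ++ (pvDedup prev l).map (fun bt => [("brand", bt.1), ("type", bt.2)]) := by
  induction l generalizing acc prev with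
  | nil => simp [pvDedup]
  | cons x xs ih =>
    by_cases h : prev ≠ some x
    · simp only [List.foldl_cons, if_pos h, pvDedup, ih, List.map_cons, List.append_assoc,
        List.singleton_append]
    · have h' : prev = some x := not_not.mp h
      subst h'
      have hc : ¬ (some x ≠ some x) := fun h => h rfl
      simp only [List.foldl_cons, pvDedup, if_neg hc]
      exact ih acc (some x)

-- on a weakly lex-sorted list, the scan keeps exactly the elements different from prev,
-- all of which are strictly above prev, and the result is strictly lex-sorted
theorem pvDedup_some (p : String × String) (l : List (String × String))
    (hs : l.Pairwise (fun a b => ¬ pvLexLt b a)) (hp : ∀ y ∈ l, ¬ pvLexLt y p) :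
    (∀ x, x ∈ pvDedup (some p) l ↔ x ∈ l ∧ x ≠ p) ∧
    (pvDedup (some p) l).Pairwise pvLexLt ∧
    (∀ z ∈ pvDedup (some p) l, pvLexLt p z) := by
  induction l generalizing p with
  | nil => simp [pvDedup]
  | cons x xs ih =>
    rw [List.pairwise_cons] at hs
    by_cases hxp : x = p
    · subst hxp
      rw [show pvDedup (some x) (x :: xs) = pvDedup (some x) xs by
        have hc : ¬ (some x ≠ some x) := fun h => h rfl
        simp only [pvDedup, if_neg hc]]
      obtain ⟨hm, hpw, hgt⟩ := ih x hs.2 hs.1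
      refine ⟨?_, hpw, hgt⟩
      intro z
      rw [hm]
      constructor
      · rintro ⟨hz, hne⟩; exact ⟨List.mem_cons_of_mem _ hz, hne⟩
      · rintro ⟨hz, hne⟩
        rcases List.mem_cons.mp hz with rfl | hz
        · exact absurd rfl hne
        · exact ⟨hz, hne⟩
    · have hpx : pvLexLt p x := (pvLexLt_total (Ne.symm hxp)).resolve_right (hp x (List.mem_cons_self))
      have hc : (some p : Option (String × String)) ≠ some x :=
        fun h => hxp (Option.some.inj h).symm
      rw [show pvDedup (some p) (x :: xs) = x :: pvDedup (some x) xs by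
        simp only [pvDedup, if_pos hc]]
      obtain ⟨hm, hpw, hgt⟩ := ih x hs.2 hs.1
      have hxs_gt : ∀ y ∈ xs, y ≠ x → pvLexLt x y := fun y hy hne =>
        (pvLexLt_total (Ne.symm hne)).resolve_right (hs.1 y hy)
      refine ⟨?_, ?_, ?_⟩
      · intro z
        simp only [List.mem_cons, hm]
        constructor
        · rintro (rfl | ⟨hz, hne⟩)
          · exact ⟨Or.inl rfl, hxp⟩
          · refine ⟨Or.inr hz, ?_⟩
            rintro rfl
            exact pvLexLt_asymm (hgt z ((hm z).mpr ⟨hz, hne⟩)) hpx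
        · rintro ⟨rfl | hz, hne⟩
          · exact Or.inl rfl
          · by_cases hzx : z = x
            · exact Or.inl hzx
            · exact Or.inr ⟨hz, hzx⟩
      · exact List.Pairwise.cons (fun z hz => hgt z hz) hpw
      · intro z hz
        rcases List.mem_cons.mp hz with rfl | hz
        · exact hpx
        · exact pvLexLt_trans hpx (hgt z hz)

theorem pvDedup_none (l : List (String × String))
    (hs : l.Pairwise (fun a b => ¬ pvLexLt b a)) :
    (∀ x, x ∈ pvDedup none l ↔ x ∈ l) ∧ (pvDedup none l).Pairwise pvLexLt := by
  cases l with
  | nil => simp [pvDedup]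
  | cons x xs =>
    rw [List.pairwise_cons] at hs
    rw [show pvDedup none (x :: xs) = x :: pvDedup (some x) xs by simp [pvDedup]]
    obtain ⟨hm, hpw, hgt⟩ := pvDedup_some x xs hs.2 hs.1
    refine ⟨?_, List.Pairwise.cons (fun z hz => hgt z hz) hpw⟩
    intro z
    simp only [List.mem_cons, hm]
    constructor
    · rintro (rfl | ⟨hz, _⟩)
      · exact Or.inl rfl
      · exact Or.inr hz
    · rintro (rfl | hz)
      · exact Or.inl rfl
      · by_cases hzx : z = x
        · exact Or.inl hzx
        · exact Or.inr ⟨hz, hzx⟩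

-- ===== main proof =====
theorem pvMain (products : List (List (String × String))) :
    groupProducts products = groupProducts_alt products := by
  set L := products.map pvBT with hL
  -- rewrite port A into a canonical shape
  have hA : groupProducts products =
      ((PySem.List.sorted (pvFold L).keys (fun k => k)).flatMap
        (fun b => (PySem.List.sorted ((pvFold L).getD b PySem.Dict.empty).keys (fun k => k)).map
          (fun t => [("brand", b), ("type", t)]))) := by
    show (PySem.List.sorted _ _).foldl _ [] = _
    have hfold : products.foldl (fun d p =>
        let d' := if pvRowGet p "brand" ∈ d.keys then d else d.insert (pvRowGet p "brand") PySem.Dict.empty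
        d'.insert (pvRowGet p "brand")
          ((d'.getD (pvRowGet p "brand") PySem.Dict.empty).insert (pvRowGet p "type") (1 : Int)))
        PySem.Dict.empty = pvFold L := by
      rw [hL, pvFold, List.foldl_map]
      rfl
    rw [hfold]
    rw [PySem.List.foldl_congr_mem _ _
      (fun acc b => acc ++ (PySem.List.sorted ((pvFold L).getD b PySem.Dict.empty).keys (fun k => k)).map
        (fun t => [("brand", b), ("type", t)])) _
      (by
        intro acc b _
        exact PySem.List.foldl_append_singleton_eq_map _ _ _)]
    rw [PySem.List.foldl_append_eq_flatMap]
    simp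
  -- rewrite port B: the foldl scan is the map of the recursive dedup of the sorted pairs
  have hB : groupProducts_alt products =
      (pvDedup none (PySem.List.sorted2 L (fun x => x.1) (fun x => x.2))).map
        (fun bt => [("brand", bt.1), ("type", bt.2)]) := by
    have hmap : products.map (fun p => (pvRowGet p "brand", pvRowGet p "type")) = L := by
      rw [hL]; rfl
    simp only [groupProducts_alt, hmap, pvFoldl_dedup, List.nil_append]
  rw [hA, hB]
  -- A's flatMap is also a map of a strictly lex-sorted pair list
  have hflat : (PySem.List.sorted (pvFold L).keys (fun k => k)).flatMap
      (fun b => (PySem.List.sorted ((pvFold L).getD b PySem.Dict.empty).keys (fun k => k)).map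
        (fun t => [("brand", b), ("type", t)])) =
      ((PySem.List.sorted (pvFold L).keys (fun k => k)).flatMap
        (fun b => (PySem.List.sorted ((pvFold L).getD b PySem.Dict.empty).keys (fun k => k)).map
          (fun t => (b, t)))).map (fun bt => [("brand", bt.1), ("type", bt.2)]) := by
    rw [List.map_flatMap]
    refine (List.flatMap_congr ?_).symm
    intro b _
    rw [List.map_map]
    rfl
  rw [hflat]
  congr 1
  set pairsA := (PySem.List.sorted (pvFold L).keys (fun k => k)).flatMap
    (fun b => (PySem.List.sorted ((pvFold L).getD b PySem.Dict.empty).keys (fun k => k)).map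
      (fun t => (b, t))) with hpA
  set pairsB := pvDedup none (PySem.List.sorted2 L (fun x => x.1) (fun x => x.2)) with hpB
  -- pairsA is strictly lex-sorted
  have hpairA : pairsA.Pairwise pvLexLt := by
    rw [hpA, List.pairwise_flatMap]
    constructor
    · intro b _
      rw [List.pairwise_map]
      have := pvSorted_keys_strict _ (pvFold_inner_nodup L b)
      exact this.imp (fun h => Or.inr ⟨rfl, h⟩)
    · have := pvSorted_keys_strict _ (pvFold_nodup L)
      refine this.imp ?_
      intro b1 b2 hb x hx y hy
      rcases List.mem_map.mp hx with ⟨t1, _, rfl⟩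
      rcases List.mem_map.mp hy with ⟨t2, _, rfl⟩
      exact Or.inl hb
  have hpairAnd : pairsA.Nodup := hpairA.imp pvLexLt_ne
  -- pairsB is strictly lex-sorted with the members of L
  obtain ⟨hBmem, hpairB⟩ := pvDedup_none _ (pvSorted2_pairwise L)
  have hpairBnd : pairsB.Nodup := hpairB.imp pvLexLt_ne
  -- same members
  have hmem : ∀ x, x ∈ pairsA ↔ x ∈ pairsB := by
    intro x
    rw [hpB, hBmem x, (PySem.List.sorted2_perm L (fun x => x.1) (fun x => x.2) false).mem_iff]
    rw [hpA]
    simp only [List.mem_flatMap, List.mem_map, PySem.List.mem_sorted]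
    constructor
    · rintro ⟨b, _, t, ht, rfl⟩
      exact ((pvFold_inner_aux L PySem.Dict.empty b t).mp ht).resolve_left (by simp)
    · intro hx
      refine ⟨x.1, ?_, x.2, ?_, rfl⟩
      · exact (pvFold_mem_keys_aux L PySem.Dict.empty x.1).mpr (Or.inr ⟨x.2, hx⟩)
      · exact (pvFold_inner_aux L PySem.Dict.empty x.1 x.2).mpr (Or.inr hx)
  have hperm : pairsA.Perm pairsB :=
    (List.perm_ext_iff_of_nodup hpairAnd hpairBnd).mpr hmem
  exact List.Perm.eq_of_pairwise
    (fun a b _ _ h1 h2 => absurd h2 (fun h2 => pvLexLt_asymm h1 h2))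
    hpairA hpairB hperm

-- ===== VERDICT (by name: the statement is the Claim_ definition above) =====
theorem groupProducts_spec : Claim_equal_groupProducts := by
  intro products _ _
  show groupProducts products = groupProducts_alt products
  exact pvMain products
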